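-- pv_equiv track=rewrite | github.com/Gayuys/Wind-noise-UI | 前风挡与车顶棚连接面差_轿车.py | get_top3_points_by_x
-- ===== SOURCE A (Python) =====
-- def get_top3_points_by_x(points):
--     # 按x坐标从小到大排序
--     sorted_points = sorted(points, key=lambda point: point[0])
--
--     # 使用集合记录已出现的点
--     seen = set()
--     result = []
--
--     # 遍历排序后的点，只添加未出现过的点
--     for point in sorted_points:
--         point_tuple = tuple(point)  # 转换为元组以便放入集合
--         if point_tuple not in seen:
--             seen.add(point_tuple)
--             result.append(point)
--
--             # 已收集到3个不同的点，提前结束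
--             if len(result) == 3:
--                 break
--
--     return result
-- ===== SOURCE B (Python) =====
-- def get_top3_points_by_x(points):
--     # Selection without sorting: three linear min-scans over the input,
--     # each picking the earliest point with the smallest x among values not yet chosen.
--     result = []
--     chosen = set()
--     for _ in range(3):
--         best = None
--         for p in points:
--             if tuple(p) in chosen:
--                 continue
--             if best is None or p[0] < best[0]:
--                 best = p
--         if best is None:
--             break
--         chosen.add(tuple(best))
--         result.append(best)
--     return result
-- ===== Notes on version B (the rewrite author's own statement) =====
-- stated objective: alternative
-- what changed: B never sorts: it performs selection — up to three linear min-scans over the unsorted input, each picking the earliest point with the smallest x whose value is not yet chosen — instead of A's full stable sort followed by a dedup scan with an early break.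
import Mathlib
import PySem

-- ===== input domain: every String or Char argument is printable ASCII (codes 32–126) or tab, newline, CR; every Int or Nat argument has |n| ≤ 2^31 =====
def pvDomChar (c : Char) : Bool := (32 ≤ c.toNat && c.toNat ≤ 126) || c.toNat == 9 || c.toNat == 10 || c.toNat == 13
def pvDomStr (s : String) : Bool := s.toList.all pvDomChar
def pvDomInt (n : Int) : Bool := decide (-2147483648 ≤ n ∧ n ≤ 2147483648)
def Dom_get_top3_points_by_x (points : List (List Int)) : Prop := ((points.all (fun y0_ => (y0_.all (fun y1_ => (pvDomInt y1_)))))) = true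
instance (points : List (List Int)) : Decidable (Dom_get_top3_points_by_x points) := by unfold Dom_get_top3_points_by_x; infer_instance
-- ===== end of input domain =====

-- B replaces A's sort-then-scan by selection: three linear min-scans, no sorting (alternative decomposition); equivalence proved on inputs whose points are all nonempty (A raises IndexError on an empty point).


-- ===== PORT A =====
-- A's for-loop over the sorted points with the early break at len(result) == 3
def pvALoop (l : List (List Int)) (seen : PySem.Set (List Int)) (result : List (List Int)) : List (List Int) :=
  match l with
  | [] => result
  | point :: rest =>
    if PySem.Set.contains seen point then pvALoop rest seen result
    else
      let result' := result ++ [point]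
      if result'.length = 3 then result'
      else pvALoop rest (PySem.Set.add seen point) result'

-- point[0] is ported as headD 0: exact under Pre_ (every point nonempty)
def get_top3_points_by_x (points : List (List Int)) : List (List Int) :=
  let sorted_points := PySem.List.sorted points (fun point => point.headD 0) false
  pvALoop sorted_points PySem.Set.empty []

-- ===== PORT B =====
-- the inner min-scan: 'best = None; for p in points: skip chosen; best is None or p[0] < best[0]'
def pvMinScan (points : List (List Int)) (chosen : PySem.Set (List Int)) : Option (List Int) :=
  points.foldl
    (fun (best : Option (List Int)) p =>
      if PySem.Set.contains chosen p then best
      else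
        match best with
        | none => some p
        | some b => if p.headD 0 < b.headD 0 then some p else best)
    none

-- the outer 'for _ in range(3)' with break when best is None
def pvBRounds : Nat → List (List Int) → PySem.Set (List Int) → List (List Int) → List (List Int)
  | 0, _, _, result => result
  | k+1, points, chosen, result =>
    match pvMinScan points chosen with
    | none => result
    | some best => pvBRounds k points (PySem.Set.add chosen best) (result ++ [best])

def get_top3_points_by_x_alt (points : List (List Int)) : List (List Int) :=
  pvBRounds 3 points PySem.Set.empty []

-- ===== PRECONDITION & SPEC =====
-- Pre_ excludes inputs containing an empty point: there A's sort key point[0] raises IndexError.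
def Pre_get_top3_points_by_x (points : List (List Int)) : Prop := ∀ p ∈ points, p ≠ []
instance (points : List (List Int)) : Decidable (Pre_get_top3_points_by_x points) := by unfold Pre_get_top3_points_by_x; infer_instance
def pvWitness_get_top3_points_by_x : List (List Int) := [[1, 2], [0, 5], [1, 2], [4, 0]]

def Spec_get_top3_points_by_x (points : List (List Int)) (out : List (List Int)) : Prop := out = get_top3_points_by_x_alt points
instance (points : List (List Int)) (out : List (List Int)) : Decidable (Spec_get_top3_points_by_x points out) := by unfold Spec_get_top3_points_by_x; infer_instance

-- ===== CLAIM (what is proved, stated in full; the proofs are below) =====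
def Claim_equal_get_top3_points_by_x : Prop := ∀ (points : List (List Int)), Dom_get_top3_points_by_x points → Pre_get_top3_points_by_x points → Spec_get_top3_points_by_x points (get_top3_points_by_x points)

-- ===== LEMMAS AND PROOFS =====

theorem pv_contains_eq {α : Type} [BEq α] [LawfulBEq α] (s : PySem.Set α) (x : α) :
    PySem.Set.contains s x = decide (x ∈ s) := by
  simp only [PySem.Set.contains, List.contains_eq_mem]

theorem pv_foldl_add {α : Type} [BEq α] [LawfulBEq α] :
    ∀ (t : List α) (s : PySem.Set α),
      List.foldl PySem.Set.add s t
        = s ++ (List.foldl PySem.Set.add [] t).filter (fun z => !(PySem.Set.contains s z)) := by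
  intro t
  induction t with
  | nil => intro s; simp
  | cons x t' ih =>
    intro s
    simp only [List.foldl_cons]
    rw [ih (PySem.Set.add s x), ih (PySem.Set.add [] x)]
    have hnil : PySem.Set.add ([] : PySem.Set α) x = [x] := rfl
    rw [hnil, List.filter_append, List.filter_filter]
    by_cases hxs : x ∈ s
    · have hadd : PySem.Set.add s x = s := by simp [PySem.Set.add, pv_contains_eq, hxs]
      rw [hadd]
      have hfx : ([x] : List α).filter (fun z => !(PySem.Set.contains s z)) = [] := by
        simp [pv_contains_eq, hxs]
      rw [hfx]
      simp only [List.append_nil, List.nil_append]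
      congr 1
      apply List.filter_congr
      intro z _
      by_cases hzx : z = x
      · subst hzx; simp [pv_contains_eq, hxs]
      · simp [pv_contains_eq, hzx]
    · have hadd : PySem.Set.add s x = s ++ [x] := by simp [PySem.Set.add, pv_contains_eq, hxs]
      rw [hadd]
      have hfx : ([x] : List α).filter (fun z => !(PySem.Set.contains s z)) = [x] := by
        simp [pv_contains_eq, hxs]
      rw [hfx, List.append_assoc]
      congr 1
      congr 1
      apply List.filter_congr
      intro z _
      by_cases hzx : z = x
      · subst hzx; simp [pv_contains_eq]
      · simp [pv_contains_eq, hzx]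

theorem pv_dedup_cons {α : Type} [BEq α] [LawfulBEq α] (x : α) (t : List α) :
    PySem.List.dedup (x :: t) = x :: (PySem.List.dedup t).filter (fun z => !(z == x)) := by
  have h := pv_foldl_add t ([x] : PySem.Set α)
  simp only [PySem.List.dedup, PySem.Set.ofList, PySem.Set.empty] at *
  simp only [List.foldl_cons]
  have hnil : PySem.Set.add ([] : PySem.Set α) x = [x] := rfl
  rw [hnil, h]
  simp [pv_contains_eq]

theorem pv_aloop_eq :
    ∀ (l : List (List Int)) (r : List (List Int)), r.length < 3 →
      pvALoop l r r = (List.foldl PySem.Set.add r l).take 3 := by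
  intro l
  induction l with
  | nil =>
    intro r hr
    simp [pvALoop, List.take_of_length_le (le_of_lt hr)]
  | cons p t ih =>
    intro r hr
    by_cases hc : p ∈ r
    · have : PySem.Set.contains r p = true := by simp [pv_contains_eq, hc]
      have hadd : PySem.Set.add r p = r := by simp [PySem.Set.add, pv_contains_eq, hc]
      simp only [pvALoop, this, if_pos, List.foldl_cons, hadd]
      exact ih r hr
    · have hcf : PySem.Set.contains r p = false := by simp [pv_contains_eq, hc]
      have hadd : PySem.Set.add r p = r ++ [p] := by simp [PySem.Set.add, pv_contains_eq, hc]
      simp only [pvALoop, hcf, Bool.false_eq_true, if_false, List.foldl_cons, hadd]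
      by_cases h3 : (r ++ [p]).length = 3
      · simp only [h3, if_pos]
        rw [pv_foldl_add t (r ++ [p])]
        rw [List.take_append_of_le_length (le_of_eq h3.symm)]
        rw [List.take_of_length_le (le_of_eq h3)]
      · simp only [h3, if_neg, ite_false]
        exact ih (r ++ [p]) (by simp at h3 ⊢; omega)

-- find? through insertBy on a key-sorted list
theorem pv_find_insertBy {α κ : Type} [LinearOrder κ] (key : α → κ) (p : α → Bool) (a : α)
    (m : List α) (hs : m.Pairwise (fun u v => key u ≤ key v)) :
    List.find? p (PySem.List.insertBy (fun u v => decide (key u < key v)) a m)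
      = if p a then
          match List.find? p m with
          | none => some a
          | some b => if key a < key b then some a else some b
        else List.find? p m := by
  induction m with
  | nil =>
    have h0 : PySem.List.insertBy (fun u v => decide (key u < key v)) a [] = [a] := rfl
    rw [h0]
    by_cases hpa : p a = true <;> simp [List.find?, hpa]
  | cons y t ih =>
    rcases List.pairwise_cons.mp hs with ⟨hy, ht⟩
    by_cases hby : key a < key y
    · have h1 : PySem.List.insertBy (fun u v => decide (key u < key v)) a (y :: t)
          = a :: y :: t := by simp [PySem.List.insertBy, hby]
      rw [h1]
      by_cases hpa : p a = true
      · rw [List.find?_cons_of_pos hpa, if_pos hpa]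
        cases hfy : List.find? p (y :: t) with
        | none => rfl
        | some b =>
          have hbmem : b ∈ y :: t := List.mem_of_find?_eq_some hfy
          have hlt : key a < key b := by
            rcases List.mem_cons.mp hbmem with h | h
            · exact h ▸ hby
            · exact lt_of_lt_of_le hby (hy b h)
          simp [hlt]
      · simp only [Bool.not_eq_true] at hpa
        rw [List.find?_cons_of_neg (by simp [hpa]), if_neg (by simp [hpa])]
    · have h1 : PySem.List.insertBy (fun u v => decide (key u < key v)) a (y :: t)
          = y :: PySem.List.insertBy (fun u v => decide (key u < key v)) a t := by
        simp [PySem.List.insertBy, hby]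
      rw [h1]
      by_cases hpy : p y = true
      · rw [List.find?_cons_of_pos hpy, List.find?_cons_of_pos hpy]
        by_cases hpa : p a = true <;> simp [hpa, hby]
      · simp only [Bool.not_eq_true] at hpy
        rw [List.find?_cons_of_neg (by simp [hpy]), List.find?_cons_of_neg (by simp [hpy])]
        exact ih ht

-- the min-scan equals find? of the first not-chosen element of the sorted list
theorem pv_minscan_eq (l : List (List Int)) (s : PySem.Set (List Int)) :
    pvMinScan l s
      = List.find? (fun p => !(PySem.Set.contains s p))
          (PySem.List.sorted l (fun p => p.headD 0) false) := by
  induction l using List.reverseRecOn with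
  | nil => rfl
  | append_singleton l a ih =>
    have hsa : PySem.List.sorted (l ++ [a]) (fun p => p.headD 0) false
        = PySem.List.insertBy (fun u v => decide (u.headD 0 < v.headD 0)) a
            (PySem.List.sorted l (fun p => p.headD 0) false) := by
      rw [PySem.List.sorted_eq_foldl_insertBy, PySem.List.sorted_eq_foldl_insertBy,
        List.foldl_append]
      rfl
    have hms : pvMinScan (l ++ [a]) s
        = (fun (best : Option (List Int)) p =>
            if PySem.Set.contains s p then best
            else
              match best with
              | none => some p
              | some b => if p.headD 0 < b.headD 0 then some p else best) (pvMinScan l s) a := by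
      simp [pvMinScan, List.foldl_append]
    rw [hms, hsa, pv_find_insertBy (fun p => p.headD 0) _ a _ (PySem.List.sorted_pairwise l (fun p => p.headD 0)), ← ih]
    by_cases hc : a ∈ s
    · simp [pv_contains_eq, hc]
    · cases hm : pvMinScan l s with
      | none => simp [pv_contains_eq, hc]
      | some b =>
        by_cases hlt : a.headD 0 < b.headD 0 <;> simp [pv_contains_eq, hc, hlt]

theorem pv_find_filter {α : Type} (p q : α → Bool) (l : List α)
    (h : ∀ z, p z = true → q z = true) :
    List.find? p (l.filter q) = List.find? p l := by
  induction l with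
  | nil => rfl
  | cons x t ih =>
    by_cases hq : q x = true
    · simp [List.filter_cons, hq, List.find?, ih]
    · have hp : p x = false := by
        cases hpx : p x
        · rfl
        · exact absurd (h x hpx) hq
      simp only [Bool.not_eq_true] at hq
      simp [List.filter_cons, hq, List.find?, hp, ih]

theorem pv_find_dedup {α : Type} [BEq α] [LawfulBEq α] (p : α → Bool) (l : List α) :
    List.find? p (PySem.List.dedup l) = List.find? p l := by
  induction l with
  | nil => rfl
  | cons x t ih =>
    rw [pv_dedup_cons]
    by_cases hp : p x = true
    · rw [List.find?_cons_of_pos hp, List.find?_cons_of_pos hp]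
    · simp only [Bool.not_eq_true] at hp
      rw [List.find?_cons_of_neg (by simp [hp]), List.find?_cons_of_neg (by simp [hp])]
      rw [pv_find_filter p (fun z => !(z == x)) _ ?_, ih]
      intro z hz
      cases hzx : (z == x)
      · simp [hzx]
      · exfalso
        have : z = x := by simpa using hzx
        rw [this, hp] at hz
        exact Bool.false_ne_true hz

theorem pv_find_eq_head_filter {α : Type} (p : α → Bool) (l : List α) :
    List.find? p l = (l.filter p).head? := by
  induction l with
  | nil => rfl
  | cons x t ih =>
    by_cases hp : p x = true
    · rw [List.find?_cons_of_pos hp, List.filter_cons_of_pos hp, List.head?_cons]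
    · simp only [Bool.not_eq_true] at hp
      rw [List.find?_cons_of_neg (by simp [hp]), List.filter_cons_of_neg (by simp [hp]), ih]

theorem pv_rounds_eq (points : List (List Int)) :
    ∀ (k : Nat) (s : PySem.Set (List Int)) (r : List (List Int)),
      pvBRounds k points s r
        = r ++ ((PySem.List.dedup (PySem.List.sorted points (fun p => p.headD 0) false)).filter
            (fun p => !(PySem.Set.contains s p))).take k := by
  intro k
  induction k with
  | zero => intro s r; simp [pvBRounds]
  | succ k ih =>
    intro s r
    have hD : (PySem.List.dedup (PySem.List.sorted points (fun p => p.headD 0) false)).Nodup :=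
      PySem.List.nodup_dedup _
    have hscan : pvMinScan points s
        = ((PySem.List.dedup (PySem.List.sorted points (fun p => p.headD 0) false)).filter
            (fun p => !(PySem.Set.contains s p))).head? := by
      rw [pv_minscan_eq, ← pv_find_dedup, pv_find_eq_head_filter]
    cases hF : ((PySem.List.dedup (PySem.List.sorted points (fun p => p.headD 0) false)).filter
        (fun p => !(PySem.Set.contains s p))) with
    | nil =>
      have : pvMinScan points s = none := by rw [hscan, hF]; rfl
      simp [pvBRounds, this, hF]
    | cons b t =>
      have hbest : pvMinScan points s = some b := by rw [hscan, hF]; rfl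
      have hstep : pvBRounds (k+1) points s r
          = pvBRounds k points (PySem.Set.add s b) (r ++ [b]) := by
        simp [pvBRounds, hbest]
      rw [hstep, ih]
      have hFn : (b :: t).Nodup := hF ▸ (List.Nodup.filter _ hD)
      have hbt : b ∉ t := (List.nodup_cons.mp hFn).1
      have htn : t.Nodup := (List.nodup_cons.mp hFn).2
      have hfilt : ((PySem.List.dedup (PySem.List.sorted points (fun p => p.headD 0) false)).filter
          (fun p => !(PySem.Set.contains (PySem.Set.add s b) p))) = t := by
        have h1 : ∀ p : List Int,
            (!(PySem.Set.contains (PySem.Set.add s b) p))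
              = ((!(PySem.Set.contains s p)) && !(p == b)) := by
          intro p
          rw [pv_contains_eq, pv_contains_eq]
          by_cases hpb : p = b
          · subst hpb
            simp [PySem.Set.mem_add]
          · by_cases hps : p ∈ s <;> simp [PySem.Set.mem_add, hps, hpb]
        calc ((PySem.List.dedup (PySem.List.sorted points (fun p => p.headD 0) false)).filter
              (fun p => !(PySem.Set.contains (PySem.Set.add s b) p)))
            = ((PySem.List.dedup (PySem.List.sorted points (fun p => p.headD 0) false)).filter
              (fun p => (!(PySem.Set.contains s p)) && !(p == b))) := by
              apply List.filter_congr; intro z _; exact h1 z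
          _ = ((PySem.List.dedup (PySem.List.sorted points (fun p => p.headD 0) false)).filter
              (fun p => (!(p == b)) && !(PySem.Set.contains s p))) := by
              apply List.filter_congr; intro z _; exact Bool.and_comm _ _
          _ = ((PySem.List.dedup (PySem.List.sorted points (fun p => p.headD 0) false)).filter
              (fun p => !(PySem.Set.contains s p))).filter (fun p => !(p == b)) := by
              rw [List.filter_filter]
          _ = (b :: t).filter (fun p => !(p == b)) := by rw [hF]
          _ = t := by
              simp only [List.filter_cons, BEq.rfl, Bool.not_true, Bool.false_eq_true, if_false]
              apply List.filter_eq_self.mpr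
              intro z hz
              have : z ≠ b := fun h => hbt (h ▸ hz)
              simp [this]
      rw [hfilt]
      simp [List.take_succ_cons]

-- ===== VERDICT (by name: the statement is the Claim_ definition above) =====
theorem get_top3_points_by_x_spec : Claim_equal_get_top3_points_by_x := by
  intro points _ _
  unfold Spec_get_top3_points_by_x
  simp only [get_top3_points_by_x, get_top3_points_by_x_alt]
  rw [pv_rounds_eq points 3 PySem.Set.empty []]
  have he : (PySem.Set.empty : PySem.Set (List Int)) = [] := rfl
  rw [he, pv_aloop_eq _ [] (by norm_num)]
  have hfe : ((PySem.List.dedup (PySem.List.sorted points (fun p => p.headD 0) false)).filter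
      (fun p => !(PySem.Set.contains ([] : PySem.Set (List Int)) p)))
      = PySem.List.dedup (PySem.List.sorted points (fun p => p.headD 0) false) := by
    apply List.filter_eq_self.mpr
    intro z _
    simp [pv_contains_eq]
  rw [hfe, List.nil_append]
  rfl
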